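-- pv_equiv track=rewrite | github.com/blzzua/codewars | 6-kyu/complete_the_pattern_14.py | wavegen
-- ===== SOURCE A (Python) =====
-- def wavegen(n,m):
--     i, grow = 0, 1
--     while m > 0:
--         if grow:
--             if i < n:
--                 i += 1
--             else:
--                 grow = 1 - grow
--                 continue
--         else:
--             if i >= 2:
--                 i -= 1
--             else:
--                 grow= 1 - grow
--                 m -= 1
--                 continue
--         yield i
-- ===== SOURCE B (Python) =====
-- def wavegen(n, m):
--     if m > 0 and n >= 1:
--         yield 1
--         for _ in range(m):
--             yield from range(2, n + 1)
--             yield from range(n - 1, 0, -1)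
-- ===== Notes on version B (the rewrite author's own statement) =====
-- stated objective: simpler
-- what changed: Replaced the grow/i direction-flag state machine (with continue-driven flips) by a closed-form emission: yield the leading 1 once, then m repetitions of the block range(2,n+1)+range(n-1,0,-1).
import Mathlib
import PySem

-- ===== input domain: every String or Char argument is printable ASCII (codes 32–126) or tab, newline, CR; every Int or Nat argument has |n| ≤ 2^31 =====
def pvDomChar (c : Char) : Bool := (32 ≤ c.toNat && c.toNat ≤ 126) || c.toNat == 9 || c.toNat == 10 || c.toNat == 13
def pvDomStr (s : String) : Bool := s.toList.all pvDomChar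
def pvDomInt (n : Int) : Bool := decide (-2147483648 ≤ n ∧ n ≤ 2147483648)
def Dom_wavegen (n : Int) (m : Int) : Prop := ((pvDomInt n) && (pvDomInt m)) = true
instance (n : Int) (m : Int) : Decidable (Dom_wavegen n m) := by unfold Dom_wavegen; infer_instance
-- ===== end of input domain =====

-- B replaces A's grow/i direction-flag state machine by a closed-form emission:
-- a leading 1 followed by m repetitions of the block [2..n] ++ [n-1..1] (objective: simpler).


-- ===== PORT A =====
-- A's while loop, step for step.  The Python variable `grow` only ever holds 1 or 0
-- (initialised to 1, flipped by `grow = 1 - grow`), so it is modelled as Bool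
-- (true = 1, false = 0); `1 - grow` becomes `!grow` and `if grow:` becomes `if grow`.
def wavegenLoop (n : Int) (i : Int) (grow : Bool) (m : Int) : List Int :=
  if _h : m > 0 then
    if hg : grow then
      if hi : i < n then (i + 1) :: wavegenLoop n (i + 1) grow m
      else wavegenLoop n i (!grow) m        -- grow = 1 - grow; continue
    else
      if hi : i ≥ 2 then (i - 1) :: wavegenLoop n (i - 1) grow m
      else wavegenLoop n i (!grow) (m - 1)  -- grow = 1 - grow; m -= 1; continue
  else []
termination_by (m.toNat, (if grow then 1 else 0 : Nat), if grow then (n - i).toNat else i.toNat)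
decreasing_by
  · exact Prod.Lex.right _ (Prod.Lex.right _ (by simp [hg]; omega))
  · exact Prod.Lex.right _ (Prod.Lex.left _ _ (by simp [hg]))
  · exact Prod.Lex.right _ (Prod.Lex.right _ (by simp [hg]; omega))
  · exact Prod.Lex.left _ _ (by omega)

def wavegen (n : Int) (m : Int) : List Int := wavegenLoop n 0 true m

-- ===== PORT B =====
-- one oscillation block: range(2, n+1) then range(n-1, 0, -1)
def waveBlock (n : Int) : List Int :=
  PySem.List.pyRange 2 (n + 1) 1 ++ PySem.List.pyRange (n - 1) 0 (-1)

def wavegen_alt (n : Int) (m : Int) : List Int :=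
  if m > 0 ∧ n ≥ 1 then 1 :: (List.replicate m.toNat (waveBlock n)).flatten else []

-- ===== PRECONDITION & SPEC =====
def Spec_wavegen (n : Int) (m : Int) (out : List Int) : Prop := out = wavegen_alt n m
instance (n : Int) (m : Int) (out : List Int) : Decidable (Spec_wavegen n m out) := by unfold Spec_wavegen; infer_instance

-- ===== CLAIM (what is proved, stated in full; the proofs are below) =====
def Claim_equal_wavegen : Prop := ∀ (n : Int) (m : Int), Dom_wavegen n m → Spec_wavegen n m (wavegen n m)

-- ===== LEMMAS AND PROOFS =====

-- ascent: from state (i, grow=1), the loop yields i+1, …, n and reaches (n, grow=0)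
theorem wavegenLoop_ascend (n : Int) (m : Int) (hm : 0 < m) :
    ∀ i, i ≤ n →
      wavegenLoop n i true m = PySem.List.pyRange (i + 1) (n + 1) 1 ++ wavegenLoop n n false m := by
  intro i hi
  induction hn : (n - i).toNat generalizing i with
  | zero =>
      have : i = n := by omega
      subst this
      rw [wavegenLoop, PySem.List.pyRange_one_eq_nil (by omega)]
      simp [hm]
  | succ k ih =>
      rw [wavegenLoop]
      have hlt : i < n := by omega
      rw [PySem.List.pyRange_one_cons (by omega)]
      simp only [hm, hlt, dif_pos, List.cons_append]
      rw [ih (i + 1) (by omega) (by omega)]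

-- descent: from state (i, grow=0) with i ≥ 1, the loop yields i-1, …, 1 and
-- reaches (1, grow=1) with m decremented
theorem wavegenLoop_descend (n : Int) (m : Int) (hm : 0 < m) :
    ∀ i, 1 ≤ i →
      wavegenLoop n i false m = PySem.List.pyRange (i - 1) 0 (-1) ++ wavegenLoop n 1 true (m - 1) := by
  intro i hi
  induction hk : (i - 1).toNat generalizing i with
  | zero =>
      have : i = 1 := by omega
      subst this
      rw [wavegenLoop, PySem.List.pyRange_neg_one_eq_nil (by omega)]
      simp [hm]
  | succ k ih =>
      rw [wavegenLoop]
      have h2 : i ≥ 2 := by omega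
      rw [PySem.List.pyRange_neg_one_cons (by omega)]
      simp only [hm, h2, dif_pos, Bool.false_eq_true, dite_false, List.cons_append]
      rw [ih (i - 1) (by omega) (by omega)]

-- degenerate: n ≤ 0 yields nothing, whatever m
theorem wavegenLoop_nonpos (n : Int) (hn : n ≤ 0) :
    ∀ m : Int, wavegenLoop n 0 true m = [] := by
  intro m
  induction hm : m.toNat generalizing m with
  | zero =>
      rw [wavegenLoop]
      have : ¬ m > 0 := by omega
      simp [this]
  | succ k ih =>
      have hm0 : 0 < m := by omega
      have h1 : ¬ (0 : Int) < n := by omega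
      have h2 : ¬ (0 : Int) ≥ 2 := by omega
      rw [wavegenLoop]
      simp only [hm0, dif_pos, h1, dite_false]
      rw [wavegenLoop]
      simp only [hm0, dif_pos, Bool.not_true, Bool.false_eq_true, dite_false, h2,
        Bool.not_false]
      exact ih (m - 1) (by omega)

-- main wave recurrence: from state (1, grow=1) the loop emits m blocks
theorem wavegenLoop_blocks (n : Int) (hn : 1 ≤ n) :
    ∀ m : Int, wavegenLoop n 1 true m = (List.replicate m.toNat (waveBlock n)).flatten := by
  intro m
  induction hm : m.toNat generalizing m with
  | zero =>
      rw [wavegenLoop]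
      have : ¬ m > 0 := by omega
      simp [this]
  | succ k ih =>
      have hm0 : 0 < m := by omega
      rw [wavegenLoop_ascend n m hm0 1 hn, wavegenLoop_descend n m hm0 n (by omega),
        ih (m - 1) (by omega)]
      simp [waveBlock, List.replicate_succ]

-- ===== VERDICT (by name: the statement is the Claim_ definition above) =====
theorem wavegen_spec : Claim_equal_wavegen := by
  intro n m _
  unfold Spec_wavegen wavegen wavegen_alt
  by_cases hm : 0 < m
  · by_cases hn : 1 ≤ n
    · have h1 : wavegenLoop n 0 true m = 1 :: wavegenLoop n 1 true m := by
        rw [wavegenLoop]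
        have h0 : (0 : Int) < n := hn
        simp [hm, h0]
      rw [h1, wavegenLoop_blocks n hn m, if_pos ⟨hm, hn⟩]
    · rw [wavegenLoop_nonpos n (by omega) m, if_neg (by omega)]
  · rw [wavegenLoop]
    simp [hm]
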